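-- pv_equiv track=rewrite | github.com/milkosek/BioinformaticGenomeSequencing | utils.py | assembleDNA
-- ===== SOURCE A (Python) =====
-- def calculateDistance(oligo1: str, oligo2: str):
--     rowSize = len(oligo1)
--     columnSize = len(oligo2)
--     if rowSize != columnSize:
--         return None
--
--     for i in range(0, rowSize):
--         if oligo1[i:rowSize] == oligo2[0: rowSize - i]:
--             return i
--     return 0
--
-- def assembleDNA(solution: list, oligo_size: int):
--     result = solution[0]
--     while len(solution) != 1:
--         dist = calculateDistance(solution[0], solution[1])
--         tmp = solution[1][oligo_size - dist: oligo_size]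
--         result += tmp
--         solution.remove(solution[0])
--     return result
-- ===== SOURCE B (Python) =====
-- def assembleDNA(solution, oligo_size):
--     # Non-mutating: A empties `solution` in place; B leaves it untouched
--     # (the equivalence is about the return value only).
--     # Overlap of each adjacent pair is found with the KMP prefix-function of
--     # cur + '\x00' + prev (the separator never occurs in the printable-ASCII
--     # oligos), giving the longest suffix of prev that is a prefix of cur in
--     # O(n) instead of A's O(n^2) slice-comparison scan.
--     parts = [solution[0]]
--     for prev, cur in zip(solution, solution[1:]):
--         if len(cur) != len(prev):
--             raise ValueError("oligos must have equal length")
--         t = cur + "\x00" + prev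
--         pi = [0] * len(t)
--         k = 0
--         for i in range(1, len(t)):
--             while k > 0 and t[i] != t[k]:
--                 k = pi[k - 1]
--             if t[i] == t[k]:
--                 k += 1
--             pi[i] = k
--         l = pi[-1]
--         dist = len(prev) - l if l > 0 else 0
--         parts.append(cur[oligo_size - dist: oligo_size])
--     return "".join(parts)
-- ===== Notes on version B (the rewrite author's own statement) =====
-- stated objective: faster
-- what changed: B finds each adjacent overlap with the KMP prefix-function of cur+'\x00'+prev (one linear failure-function pass) instead of A's nested scan that compares a pair of slices at every shift, and assembles the result with one ''.join over adjacent pairs instead of A's while-loop with solution.remove(solution[0]); B does not mutate the input list.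
import Mathlib
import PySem

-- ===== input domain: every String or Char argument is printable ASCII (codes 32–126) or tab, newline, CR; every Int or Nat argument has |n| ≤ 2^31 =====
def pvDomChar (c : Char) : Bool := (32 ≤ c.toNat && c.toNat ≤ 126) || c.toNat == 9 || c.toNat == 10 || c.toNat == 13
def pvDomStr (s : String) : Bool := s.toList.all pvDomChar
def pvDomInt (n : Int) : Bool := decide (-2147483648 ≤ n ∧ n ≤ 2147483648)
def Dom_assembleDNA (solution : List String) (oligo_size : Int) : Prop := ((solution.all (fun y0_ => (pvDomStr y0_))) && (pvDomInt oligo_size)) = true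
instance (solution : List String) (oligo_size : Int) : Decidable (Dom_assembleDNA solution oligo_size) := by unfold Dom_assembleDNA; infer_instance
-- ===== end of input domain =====

-- B finds each adjacent overlap with the KMP prefix-function of cur+'\x00'+prev (linear)
-- instead of A's quadratic slice-comparison scan, and joins the pieces instead of A's
-- remove/+= loop; equivalence is about the RETURN value only (Python A empties `solution`
-- in place, B leaves it untouched).

-- ===== PORT A =====
-- for i in range(0, rowSize): if oligo1[i:rowSize] == oligo2[0:rowSize-i]: return i / return 0
def calcLoop (o1 o2 : String) (rowSize : Int) : List Int → Int
  | [] => 0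
  | i :: rest =>
    if PySem.Str.slice o1 (some i) (some rowSize) = PySem.Str.slice o2 (some 0) (some (rowSize - i))
    then i else calcLoop o1 o2 rowSize rest

def calculateDistance (oligo1 oligo2 : String) : Option Int :=
  let rowSize : Int := PySem.Str.len oligo1
  let columnSize : Int := PySem.Str.len oligo2
  if rowSize ≠ columnSize then none
  else some (calcLoop oligo1 oligo2 rowSize (PySem.List.pyRange 0 rowSize 1))

-- while len(solution) != 1: … ; solution.remove(solution[0]) drops the head
def asmLoop (oligo_size : Int) : List String → String → String
  | [], result => result            -- Python: IndexError (solution[0] on []); outside Pre_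
  | [_], result => result
  | s0 :: s1 :: rest, result =>
    match calculateDistance s0 s1 with
    | none => result                -- Python: TypeError (oligo_size - None); outside Pre_
    | some dist =>
      asmLoop oligo_size (s1 :: rest)
        (result ++ PySem.Str.slice s1 (some (oligo_size - dist)) (some oligo_size))

def assembleDNA (solution : List String) (oligo_size : Int) : String :=
  match solution with
  | [] => ""                        -- Python: IndexError; outside Pre_
  | s0 :: rest => asmLoop oligo_size (s0 :: rest) s0

-- ===== PORT B =====
-- while k > 0 and t[i] != t[k]: k = pi[k-1]   (fuel = k suffices: pi[j] ≤ j, so k decreases)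
def kmpFall (t : List Char) (pi : List Nat) (c : Char) : Nat → Nat → Nat
  | 0, k => k
  | fuel+1, k => if 0 < k ∧ t.getD k ' ' ≠ c then kmpFall t pi c fuel (pi.getD (k-1) 0) else k

-- one iteration of `for i in range(1, len(t))`; pi grows by the entry written at index i
def kmpStep (t : List Char) (st : List Nat × Nat) (i : Nat) : List Nat × Nat :=
  let c := t.getD i ' '
  let k1 := kmpFall t st.1 c st.2 st.2
  let k2 := if t.getD k1 ' ' = c then k1 + 1 else 0
  (st.1 ++ [k2], k2)

-- pi[-1] of the prefix-function of t (Python writes pi[i] at step i and reads pi[k-1],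
-- k-1 < i, so building pi left-to-right is the same computation); = final k
def kmpLast (t : List Char) : Nat :=
  ((List.range' 1 (t.length - 1)).foldl (kmpStep t) ([0], 0)).2

-- body of B's for-loop: the piece appended for the pair (prev, cur)
def altPart (oligo_size : Int) (pc : String × String) : String :=
  if PySem.Str.len pc.2 ≠ PySem.Str.len pc.1 then ""  -- Python: raise ValueError; outside Pre_
  else
  let t := pc.2.toList ++ '\x00' :: pc.1.toList
  let l := kmpLast t
  let dist : Int := if 0 < l then PySem.Str.len pc.1 - (l : Int) else 0
  PySem.Str.slice pc.2 (some (oligo_size - dist)) (some oligo_size)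

def assembleDNA_alt (solution : List String) (oligo_size : Int) : String :=
  match solution with
  | [] => ""                        -- Python: IndexError; outside Pre_
  | s0 :: rest =>
    PySem.Str.join "" (s0 :: ((s0 :: rest).zip rest).map (altPart oligo_size))

-- ===== PRECONDITION & SPEC =====
-- Pre_ excludes exactly the inputs where Python A raises: the empty list (IndexError on
-- solution[0]) and lists with two adjacent oligos of different length (calculateDistance
-- returns None, then oligo_size - None is a TypeError).
def Pre_assembleDNA (solution : List String) (oligo_size : Int) : Prop :=
  solution ≠ [] ∧ List.IsChain (fun a b => PySem.Str.len a = PySem.Str.len b) solution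
instance (solution : List String) (oligo_size : Int) : Decidable (Pre_assembleDNA solution oligo_size) := by unfold Pre_assembleDNA; infer_instance

def pvWitness_assembleDNA : List String × Int := (["ACGT", "GTAC"], 4)

def Spec_assembleDNA (solution : List String) (oligo_size : Int) (out : String) : Prop := out = assembleDNA_alt solution oligo_size
instance (solution : List String) (oligo_size : Int) (out : String) : Decidable (Spec_assembleDNA solution oligo_size out) := by unfold Spec_assembleDNA; infer_instance

-- ===== CLAIM (what is proved, stated in full; the proofs are below) =====
def Claim_equal_assembleDNA : Prop := ∀ (solution : List String) (oligo_size : Int), Dom_assembleDNA solution oligo_size → Pre_assembleDNA solution oligo_size → Spec_assembleDNA solution oligo_size (assembleDNA solution oligo_size)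

-- ===== LEMMAS AND PROOFS =====

abbrev isB (s : List Char) (k : Nat) : Prop := k < s.length ∧ s.take k <:+ s

lemma isB_iff_drop (s : List Char) (k : Nat) :
    isB s k ↔ k < s.length ∧ s.take k = s.drop (s.length - k) := by
  constructor
  · rintro ⟨h1, h2⟩
    refine ⟨h1, ?_⟩
    have := List.suffix_iff_eq_drop.mp h2
    rwa [List.length_take, Nat.min_eq_left (Nat.le_of_lt h1)] at this
  · rintro ⟨h1, h2⟩
    exact ⟨h1, h2 ▸ List.drop_suffix _ _⟩

lemma isB_take (s : List Char) (k j : Nat) (hk : isB s k) (hj : isB s j) (hlt : j < k) :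
    isB (s.take k) j := by
  refine ⟨by simp [Nat.lt_min.mpr ⟨hlt, hj.1⟩], ?_⟩
  rw [List.take_take, Nat.min_eq_left (Nat.le_of_lt hlt)]
  exact List.suffix_of_suffix_length_le hj.2 hk.2
    (by simp [List.length_take]; omega)

lemma isB_of_take (s : List Char) (k j : Nat) (hk : isB s k) (hj : isB (s.take k) j) :
    isB s j := by
  have hjk : j < k := lt_of_lt_of_le hj.1 (by simp)
  refine ⟨hjk.trans hk.1, ?_⟩
  have : s.take j = (s.take k).take j := by
    rw [List.take_take, Nat.min_eq_left (Nat.le_of_lt hjk)]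
  rw [this]
  exact hj.2.trans hk.2

lemma isB_succ_iff (s : List Char) (c : Char) (j : Nat) :
    isB (s ++ [c]) (j + 1) ↔ isB s j ∧ s.getD j ' ' = c := by
  constructor
  · rintro ⟨h1, h2⟩
    simp only [List.length_append, List.length_singleton] at h1
    have hj : j < s.length := by omega
    rw [List.suffix_iff_eq_drop] at h2
    rw [List.length_take, List.length_append] at h2
    simp only [List.length_singleton] at h2
    have hlen : min (j+1) (s.length + 1) = j + 1 := by omega
    rw [hlen] at h2
    rw [List.take_append_of_le_length (by omega), List.take_succ_eq_append_getElem hj] at h2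
    rw [List.drop_append_of_le_length (by omega : s.length + 1 - (j+1) ≤ s.length)] at h2
    have hd : s.length + 1 - (j + 1) = s.length - j := by omega
    rw [hd] at h2
    obtain ⟨e1, e2⟩ := List.append_inj' h2 rfl
    have e2' : s[j] = c := by simpa using e2
    refine ⟨⟨hj, ?_⟩, by simp [List.getD_eq_getElem?_getD, hj, e2']⟩
    rw [List.suffix_iff_eq_drop, List.length_take, Nat.min_eq_left (Nat.le_of_lt hj)]
    exact e1
  · rintro ⟨⟨hj, hsuf⟩, hc⟩
    have hgj : s[j] = c := by
      rwa [List.getD_eq_getElem?_getD, List.getElem?_eq_getElem hj] at hc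
    refine ⟨by simp; omega, ?_⟩
    apply List.suffix_iff_eq_drop.mpr
    rw [List.take_append_of_le_length (by omega), List.take_succ_eq_append_getElem hj, hgj]
    rw [List.length_append, List.length_append, List.length_take,
      Nat.min_eq_left (Nat.le_of_lt hj)]
    simp only [List.length_singleton]
    rw [List.drop_append_of_le_length (by omega : s.length + 1 - (j+1) ≤ s.length)]
    have hd : s.length + 1 - (j + 1) = s.length - j := by omega
    rw [hd]
    congr 1
    have := List.suffix_iff_eq_drop.mp hsuf
    rwa [List.length_take, Nat.min_eq_left (Nat.le_of_lt hj)] at this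

def mB (s : List Char) : Nat := Nat.findGreatest (isB s) s.length

lemma isB_zero (s : List Char) (h : s ≠ []) : isB s 0 :=
  ⟨List.length_pos_of_ne_nil h, by simp⟩

lemma mB_isB (s : List Char) (h : s ≠ []) : isB s (mB s) :=
  Nat.findGreatest_spec (Nat.zero_le _) (isB_zero s h)

lemma isB_le_mB (s : List Char) (k : Nat) (hk : isB s k) : k ≤ mB s :=
  Nat.le_findGreatest (Nat.le_of_lt hk.1) hk

lemma mB_lt (s : List Char) (h : s ≠ []) : mB s < s.length := (mB_isB s h).1

lemma getD_take (t : List Char) (i k : Nat) (h : k < i) :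
    (t.take i).getD k ' ' = t.getD k ' ' := by
  rw [List.getD_eq_getElem?_getD, List.getD_eq_getElem?_getD]
  simp [h]

lemma kmpFall_exit (t : List Char) (pi : List Nat) (c : Char) (fuel k : Nat)
    (h : ¬(0 < k ∧ t.getD k ' ' ≠ c)) : kmpFall t pi c fuel k = k := by
  cases fuel with
  | zero => rfl
  | succ f => simp only [kmpFall, if_neg h]

lemma kmpFall_correct (t : List Char) (pi : List Nat) (i : Nat) (hi : i < t.length)
    (hpi : ∀ j, j < i → pi.getD j 0 = mB (t.take (j + 1))) :
    ∀ k fuel, k ≤ fuel → isB (t.take i) k →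
      (∀ j, isB (t.take i) j → (t.take i).getD j ' ' = t.getD i ' ' → j ≤ k) →
      (if t.getD (kmpFall t pi (t.getD i ' ') fuel k) ' ' = t.getD i ' '
       then kmpFall t pi (t.getD i ' ') fuel k + 1 else 0) = mB (t.take (i + 1)) := by
  have hslen : (t.take i).length = i := by simp [Nat.le_of_lt hi]
  have htake : t.take (i + 1) = t.take i ++ [t[i]] := List.take_succ_eq_append_getElem hi
  have hgi : t.getD i ' ' = t[i] := by
    rw [List.getD_eq_getElem?_getD, List.getElem?_eq_getElem hi]; rfl
  intro k
  induction k using Nat.strong_induction_on with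
  | _ k IH =>
    intro fuel hfuel hB hmax
    by_cases hck : t.getD k ' ' = t.getD i ' '
    · rw [kmpFall_exit t pi _ fuel k (by intro hcond; exact hcond.2 hck), if_pos hck]
      have hki : k < i := hslen ▸ hB.1
      have hsk : (t.take i).getD k ' ' = t.getD i ' ' := by
        rw [getD_take t i k hki]; exact hck
      apply Nat.le_antisymm
      · -- k+1 ≤ mB
        rw [htake]
        apply isB_le_mB
        rw [← hgi]
        exact (isB_succ_iff (t.take i) (t.getD i ' ') k).mpr ⟨hB, hsk⟩
      · -- mB ≤ k+1
        have hne : t.take (i+1) ≠ [] := by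
          intro h
          have hl : (t.take (i+1)).length = 0 := by rw [h]; rfl
          rw [List.length_take] at hl; omega
        have hM := mB_isB _ hne
        rcases hMe : mB (t.take (i+1)) with _ | m
        · omega
        · rw [hMe] at hM
          rw [htake, ← hgi] at hM
          obtain ⟨hBm, hcm⟩ := (isB_succ_iff _ _ _).mp hM
          have := hmax m hBm hcm
          omega
    · by_cases hk0 : k = 0
      · subst hk0
        rw [kmpFall_exit t pi _ fuel 0 (by simp), if_neg hck]
        have hne : t.take (i+1) ≠ [] := by
          intro h
          have hl : (t.take (i+1)).length = 0 := by rw [h]; rfl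
          rw [List.length_take] at hl; omega
        have hM := mB_isB _ hne
        rcases hMe : mB (t.take (i+1)) with _ | m
        · rfl
        · exfalso
          rw [hMe, htake, ← hgi] at hM
          obtain ⟨hBm, hcm⟩ := (isB_succ_iff _ _ _).mp hM
          have hm0 : m = 0 := Nat.le_zero.mp (hmax m hBm hcm)
          subst hm0
          have h0i : 0 < i := hslen ▸ hBm.1
          rw [getD_take t i 0 h0i] at hcm
          exact hck hcm
      · have hkpos : 0 < k := Nat.pos_of_ne_zero hk0
        obtain ⟨f, rfl⟩ : ∃ f, fuel = f + 1 := ⟨fuel - 1, by omega⟩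
        rw [show kmpFall t pi (t.getD i ' ') (f+1) k
            = kmpFall t pi (t.getD i ' ') f (pi.getD (k-1) 0) from by
          simp only [kmpFall, if_pos (And.intro hkpos hck)]]
        have hki : k < i := hslen ▸ hB.1
        have hpival : pi.getD (k-1) 0 = mB (t.take k) := by
          have := hpi (k-1) (by omega)
          rwa [show k - 1 + 1 = k from by omega] at this
        have htk : (t.take i).take k = t.take k := by
          rw [List.take_take, Nat.min_eq_left (Nat.le_of_lt hki)]
        have htklen : (t.take k).length = k := by
          simp [Nat.le_of_lt (hki.trans hi)]
        have htkne : t.take k ≠ [] := by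
          intro hnil; rw [hnil] at htklen; simp at htklen; omega
        have hk' : pi.getD (k-1) 0 < k := by
          rw [hpival]; have := mB_lt _ htkne; omega
        apply IH _ hk' f (by omega)
        · rw [hpival]
          apply isB_of_take (t.take i) k _ hB
          rw [htk]
          exact mB_isB _ htkne
        · intro j hBj hcj
          have hjk : j ≤ k := hmax j hBj hcj
          have hjne : j ≠ k := by
            intro he; subst he
            rw [getD_take t i j (hslen ▸ hBj.1)] at hcj
            exact hck hcj
          rw [hpival]
          apply isB_le_mB
          rw [← htk]
          exact isB_take (t.take i) k j hB hBj (by omega)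

lemma mB_short (s : List Char) (h : s.length ≤ 1) : mB s = 0 := by
  rcases List.eq_nil_or_concat s with rfl | _
  · rfl
  · have := mB_lt s (by intro hn; subst hn; simp_all)
    omega

lemma kmp_inv (t : List Char) : ∀ m, m + 1 ≤ t.length →
    (((List.range' 1 m).foldl (kmpStep t) ([0], 0)).1.length = m + 1) ∧
    (∀ j, j < m + 1 → ((List.range' 1 m).foldl (kmpStep t) ([0], 0)).1.getD j 0 = mB (t.take (j + 1))) ∧
    ((List.range' 1 m).foldl (kmpStep t) ([0], 0)).2 = mB (t.take (m + 1)) := by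
  intro m
  induction m with
  | zero =>
    intro h1
    refine ⟨rfl, ?_, ?_⟩
    · intro j hj
      have hj0 : j = 0 := by omega
      subst hj0
      rw [mB_short _ (by rw [List.length_take]; omega)]
      rfl
    · rw [mB_short _ (by rw [List.length_take]; omega)]
      rfl
  | succ m ih =>
    intro hlen
    obtain ⟨ihlen, ihpi, ihk⟩ := ih (by omega)
    rw [List.range'_concat, List.foldl_append]
    set st := (List.range' 1 m).foldl (kmpStep t) ([0], 0) with hst
    have hi1 : 1 + 1 * m = m + 1 := by omega
    rw [hi1, List.foldl_cons, List.foldl_nil]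
    have hi : m + 1 < t.length := by omega
    have hne : t.take (m+1) ≠ [] := by
      intro h
      have hl : (t.take (m+1)).length = 0 := by rw [h]; rfl
      rw [List.length_take] at hl; omega
    have hk2 : (kmpStep t st (m+1)).2 = mB (t.take (m + 1 + 1)) := by
      show (if t.getD (kmpFall t st.1 (t.getD (m+1) ' ') st.2 st.2) ' ' = t.getD (m+1) ' '
            then kmpFall t st.1 (t.getD (m+1) ' ') st.2 st.2 + 1 else 0) = _
      rw [ihk]
      exact kmpFall_correct t st.1 (m+1) hi (fun j hj => ihpi j hj)
        (mB (t.take (m+1))) (mB (t.take (m+1))) le_rfl (mB_isB _ hne)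
        (fun j hBj _ => isB_le_mB _ j hBj)
    refine ⟨?_, ?_, ?_⟩
    · show (st.1 ++ [_]).length = m + 2
      rw [List.length_append, ihlen]; rfl
    · intro j hj
      show (st.1 ++ [(kmpStep t st (m+1)).2]).getD j 0 = _
      by_cases hjm : j < m + 1
      · rw [List.getD_append _ _ _ _ (by omega), ihpi j hjm]
      · have hje : j = m + 1 := by omega
        subst hje
        rw [List.getD_eq_getElem?_getD, List.getElem?_append_right (by omega), ihlen]
        simp [hk2]
    · exact hk2

lemma kmpLast_eq (t : List Char) (h : t ≠ []) : kmpLast t = mB t := by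
  have hlen : 1 ≤ t.length := List.length_pos_of_ne_nil h
  have := (kmp_inv t (t.length - 1) (by omega)).2.2
  rw [kmpLast, this, show t.length - 1 + 1 = t.length from by omega, List.take_length]

lemma isB_sep (p c : List Char) (n : Nat) (hp : p.length = n) (hc : c.length = n)
    (hsp : '\x00' ∉ p) (k : Nat) :
    isB (c ++ '\x00' :: p) k ↔ k ≤ n ∧ c.take k = p.drop (n - k) := by
  have hlt : (c ++ '\x00' :: p).length = 2 * n + 1 := by simp [hp, hc]; omega
  have hdropform : ∀ m, m ≤ n →
      (c ++ '\x00' :: p).drop (2 * n + 1 - m) = p.drop (n - m) := by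
    intro m hm
    have h1 : 2 * n + 1 - m = c.length + (n + 1 - m) := by omega
    rw [h1, List.drop_length_add_append]
    have h2 : n + 1 - m = (n - m) + 1 := by omega
    rw [h2, List.drop_succ_cons]
  constructor
  · rintro ⟨h1, h2⟩
    rw [hlt] at h1
    have hkn : k ≤ n := by
      by_contra hgt
      rw [Nat.not_le] at hgt
      have htd := (isB_iff_drop _ k).mp ⟨hlt ▸ h1, h2⟩ |>.2
      have hnlt : n < ((c ++ '\x00' :: p).take k).length := by
        rw [List.length_take, hlt]; omega
      rw [hlt] at htd
      have := congrArg (fun l => l[n]?) htd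
      simp only [List.getElem?_take, List.getElem?_drop] at this
      -- LHS: index n of the full list = the separator
      have hL : (c ++ '\x00' :: p)[n]? = some '\x00' := by
        rw [List.getElem?_append_right (by omega), hc]
        simp
      -- RHS: index 2n+1-k+n lands inside p
      have hidx : 2 * n + 1 - k + n = c.length + (1 + (2 * n - k)) := by omega
      have hR : (c ++ '\x00' :: p)[2 * n + 1 - k + n]? = p[2 * n - k]? := by
        rw [hidx, List.getElem?_append_right (by omega)]
        rw [Nat.add_sub_cancel_left, Nat.add_comm, List.getElem?_cons_succ]
      rw [if_pos (by omega)] at this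
      rw [hL, hR] at this
      have hmem : '\x00' ∈ p := by
        have hlen : 2 * n - k < p.length := by omega
        rw [List.getElem?_eq_getElem hlen] at this
        exact (Option.some_inj.mp this) ▸ List.getElem_mem hlen
      exact hsp hmem
    refine ⟨hkn, ?_⟩
    have htd := (isB_iff_drop _ k).mp ⟨by rw [hlt]; omega, h2⟩ |>.2
    rw [hlt, hdropform k hkn, List.take_append_of_le_length (by omega)] at htd
    exact htd
  · rintro ⟨hkn, heq⟩
    apply (isB_iff_drop _ k).mpr
    refine ⟨by rw [hlt]; omega, ?_⟩
    rw [hlt, hdropform k hkn, List.take_append_of_le_length (by omega)]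
    exact heq

lemma mB_sep (p c : List Char) (n : Nat) (hp : p.length = n) (hc : c.length = n)
    (hsp : '\x00' ∉ p) :
    mB (c ++ '\x00' :: p) = Nat.findGreatest (fun k => k ≤ n ∧ c.take k = p.drop (n - k)) n := by
  have htne : c ++ '\x00' :: p ≠ [] := by simp
  apply Nat.le_antisymm
  · have hM := mB_isB _ htne
    rw [isB_sep p c n hp hc hsp] at hM
    exact Nat.le_findGreatest hM.1 hM
  · have h0 : (fun k => k ≤ n ∧ c.take k = p.drop (n - k)) 0 := by
      refine ⟨Nat.zero_le n, ?_⟩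
      simp [← hp]
    have hL := Nat.findGreatest_spec (P := fun k => k ≤ n ∧ c.take k = p.drop (n - k)) (Nat.zero_le n) h0
    apply isB_le_mB
    exact (isB_sep p c n hp hc hsp _).mpr hL

lemma condA (p c : String) (n : Nat) (hp : p.toList.length = n) (hc : c.toList.length = n)
    (a : Nat) (ha : a < n) :
    (PySem.Str.slice p (some (a : Int)) (some (n : Int)) =
      PySem.Str.slice c (some 0) (some ((n : Int) - (a : Int))))
    ↔ c.toList.take (n - a) = p.toList.drop (n - (n - a)) := by
  rw [← String.toList_inj, PySem.Str.toList_slice, PySem.Str.toList_slice]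
  simp only [PySem.Chars.slice_eq_listSlice]
  have hna : (n : Int) - (a : Int) = ((n - a : Nat) : Int) := by omega
  rw [hna, PySem.List.slice_natCast]
  simp only [PySem.List.slice_zero_start, PySem.List.slice_to_natCast]
  have hlen : (p.toList.drop a).length = n - a := by simp [hp]
  rw [List.take_of_length_le (le_of_eq hlen)]
  have hnna : n - (n - a) = a := by omega
  rw [hnna, eq_comm]

lemma calcLoop_eq (p c : String) (n : Nat) (hp : p.toList.length = n) (hc : c.toList.length = n) :
    ∀ a, a ≤ n →
      calcLoop p c (n : Int) (PySem.List.pyRange (a : Int) (n : Int) 1) =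
        (if 0 < Nat.findGreatest (fun k => k ≤ n ∧ c.toList.take k = p.toList.drop (n - k)) (n - a)
         then (n : Int) - (Nat.findGreatest (fun k => k ≤ n ∧ c.toList.take k = p.toList.drop (n - k)) (n - a) : Int) else 0) := by
  intro a ha
  induction hgen : n - a generalizing a with
  | zero =>
    have haN : a = n := by omega
    subst haN
    rw [PySem.List.pyRange_one_eq_nil (by omega)]
    simp [calcLoop]
  | succ m ih =>
    have haN : a < n := by omega
    rw [PySem.List.pyRange_one_cons (by exact_mod_cast haN)]
    simp only [calcLoop]
    by_cases hcond : PySem.Str.slice p (some (a:Int)) (some (n:Int)) =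
        PySem.Str.slice c (some 0) (some ((n:Int) - (a:Int)))
    · rw [if_pos hcond]
      have hov : c.toList.take (n - a) = p.toList.drop (n - (n - a)) :=
        (condA p c n hp hc a haN).mp hcond
      have hfg : Nat.findGreatest (fun k => k ≤ n ∧ c.toList.take k = p.toList.drop (n - k)) (n - a) = n - a :=
        Nat.le_antisymm (Nat.findGreatest_le _) (Nat.le_findGreatest le_rfl ⟨by omega, hov⟩)
      rw [hgen] at hfg
      rw [hfg, if_pos (by omega)]
      omega
    · rw [if_neg hcond]
      have hov : ¬ (fun k => k ≤ n ∧ c.toList.take k = p.toList.drop (n - k)) (n - a) := by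
        intro hh
        exact hcond ((condA p c n hp hc a haN).mpr hh.2)
      have h1 : (a:Int) + 1 = ((a+1 : Nat) : Int) := by omega
      rw [hgen] at hov
      have key : Nat.findGreatest (fun k => k ≤ n ∧ c.toList.take k = p.toList.drop (n - k)) (m + 1)
          = Nat.findGreatest (fun k => k ≤ n ∧ c.toList.take k = p.toList.drop (n - k)) m := by
        rw [Nat.findGreatest_succ, if_neg hov]
      rw [h1, ih (a+1) (by omega) (by omega), key]


lemma pair_eq (s0 s1 : String) (oligo_size : Int) (h : PySem.Str.len s0 = PySem.Str.len s1)
    (hs0 : '\x00' ∉ s0.toList) :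
    ∃ d, calculateDistance s0 s1 = some d ∧
      PySem.Str.slice s1 (some (oligo_size - d)) (some oligo_size) = altPart oligo_size (s0, s1) := by
  have hlen0 : PySem.Str.len s0 = (s0.toList.length : Int) := PySem.Str.len_eq s0
  have hlen1 : PySem.Str.len s1 = (s1.toList.length : Int) := PySem.Str.len_eq s1
  set n := s0.toList.length with hn
  have hc : s1.toList.length = n := by
    have h' := h; rw [hlen0, hlen1] at h'; exact_mod_cast h'.symm
  refine ⟨calcLoop s0 s1 (PySem.Str.len s0) (PySem.List.pyRange 0 (PySem.Str.len s0) 1), ?_, ?_⟩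
  · rw [calculateDistance]
    simp only [h, ne_eq, not_true_eq_false, if_false]
  · rw [altPart]
    rw [if_neg (fun hh => hh h.symm)]
    have hlast : kmpLast (s1.toList ++ '\x00' :: s0.toList)
        = Nat.findGreatest (fun k => k ≤ n ∧ s1.toList.take k = s0.toList.drop (n - k)) n := by
      rw [kmpLast_eq _ (by simp), mB_sep s0.toList s1.toList n rfl hc hs0]
    have hd : calcLoop s0 s1 (PySem.Str.len s0) (PySem.List.pyRange 0 (PySem.Str.len s0) 1)
        = (if 0 < Nat.findGreatest (fun k => k ≤ n ∧ s1.toList.take k = s0.toList.drop (n - k)) n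
           then (n : Int) - (Nat.findGreatest (fun k => k ≤ n ∧ s1.toList.take k = s0.toList.drop (n - k)) n : Int) else 0) := by
      have := calcLoop_eq s0 s1 n rfl hc 0 (Nat.zero_le n)
      rw [Nat.cast_zero, Nat.sub_zero] at this
      rw [hlen0]
      exact this
    have : calcLoop s0 s1 (PySem.Str.len s0) (PySem.List.pyRange 0 (PySem.Str.len s0) 1)
        = (if 0 < kmpLast (s1.toList ++ '\x00' :: s0.toList)
           then PySem.Str.len s0 - (kmpLast (s1.toList ++ '\x00' :: s0.toList) : Int) else 0) := by
      rw [hd, hlast, hlen0]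
    rw [this]

lemma strJoin_nil : PySem.Str.join "" ([] : List String) = "" := by
  apply String.toList_inj.mp
  simp [PySem.Str.toList_join, PySem.Chars.join_nil]

lemma strJoin_cons (x : String) (l : List String) :
    PySem.Str.join "" (x :: l) = x ++ PySem.Str.join "" l := by
  apply String.toList_inj.mp
  cases l with
  | nil => simp [PySem.Str.toList_join, PySem.Chars.join_nil, PySem.Chars.join_singleton]
  | cons y t => simp [PySem.Str.toList_join, PySem.Chars.join_cons_cons]

lemma noNul_of_dom (s : String) (h : pvDomStr s = true) : '\x00' ∉ s.toList := by
  intro hmem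
  have := List.all_eq_true.mp h _ hmem
  simp [pvDomChar] at this

lemma asm_join (oligo_size : Int) :
    ∀ (rest : List String) (s0 result : String),
      List.IsChain (fun a b => PySem.Str.len a = PySem.Str.len b) (s0 :: rest) →
      (∀ s ∈ s0 :: rest, '\x00' ∉ s.toList) →
      asmLoop oligo_size (s0 :: rest) result =
        result ++ PySem.Str.join "" (((s0 :: rest).zip rest).map (altPart oligo_size)) := by
  intro rest
  induction rest with
  | nil =>
    intro s0 result _ _
    simp only [asmLoop, List.zip_nil_right, List.map_nil, strJoin_nil, String.append_empty]
  | cons s1 rest ih =>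
    intro s0 result hch hnul
    obtain ⟨h01, hch'⟩ := List.isChain_cons_cons.mp hch
    obtain ⟨d, hd, hslice⟩ := pair_eq s0 s1 oligo_size h01 (hnul s0 (by simp))
    simp only [asmLoop, hd, List.zip_cons_cons, List.map_cons, strJoin_cons]
    rw [ih s1 _ hch' (fun s hs => hnul s (List.mem_cons_of_mem _ hs)), hslice,
      String.append_assoc]

-- ===== VERDICT (by name: the statement is the Claim_ definition above) =====
theorem assembleDNA_spec : Claim_equal_assembleDNA := by
  intro solution oligo_size hdom hpre
  obtain ⟨hne, hchain⟩ := hpre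
  have hall : ∀ s ∈ solution, '\x00' ∉ s.toList := by
    intro s hs
    have hdom' := (Bool.and_eq_true _ _).mp hdom |>.1
    exact noNul_of_dom s (List.all_eq_true.mp hdom' _ hs)
  cases solution with
  | nil => exact absurd rfl hne
  | cons s0 rest =>
    show assembleDNA _ _ = assembleDNA_alt _ _
    rw [assembleDNA, assembleDNA_alt, asm_join oligo_size rest s0 s0 hchain hall, strJoin_cons]
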